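-- pv_equiv track=rewrite | github.com/AlwaysUsePython/MessingWithStockfish | main.py | get_san
-- ===== SOURCE A (Python) =====
-- def get_san(pgnString):
--     san = []
--
--     currentTwo = "__"
--     currentMove = ""
--     addToMove = False
--     for letter in pgnString:
--
--         currentTwo += letter
--         currentTwo = currentTwo[1:]
--
--         if letter == " " and addToMove == True:
--             san.append(currentMove)
--             currentMove = ""
--             addToMove = False
--
--         elif addToMove:
--             currentMove += letter
--
--         else:
--             if currentTwo == ". ":
--                 addToMove = True
--
--     return san
-- ===== SOURCE B (Python) =====
-- def get_san(pgnString):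
--     # Split on literal spaces: a move is the token right after a dot-terminated
--     # token, provided another space follows it (i.e. it is not the final token).
--     # The move token itself is consumed and cannot trigger.
--     tokens = pgnString.split(" ")
--     san = []
--     i = 0
--     last = len(tokens) - 1
--     while i < last:
--         if tokens[i].endswith("."):
--             if i + 1 < last:
--                 san.append(tokens[i + 1])
--             i += 2
--         else:
--             i += 1
--     return san
-- ===== Notes on version B (the rewrite author's own statement) =====
-- stated objective: faster
-- what changed: Replaces A's character-by-character sliding-window state machine (two-char window, collecting flag, move accumulator) by splitting the string on spaces once and scanning the resulting token list with a skip-2 index loop: a move is the token right after a dot-terminated token, provided it is not the last token.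
import Mathlib
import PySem

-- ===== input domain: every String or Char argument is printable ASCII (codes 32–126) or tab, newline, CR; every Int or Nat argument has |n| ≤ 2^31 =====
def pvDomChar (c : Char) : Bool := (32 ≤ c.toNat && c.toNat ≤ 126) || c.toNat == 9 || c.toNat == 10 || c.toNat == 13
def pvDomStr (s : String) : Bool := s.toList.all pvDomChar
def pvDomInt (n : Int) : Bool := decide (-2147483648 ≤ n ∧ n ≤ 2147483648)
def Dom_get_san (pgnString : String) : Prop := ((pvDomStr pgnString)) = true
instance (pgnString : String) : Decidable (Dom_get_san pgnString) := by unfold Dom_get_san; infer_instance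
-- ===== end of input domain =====

-- B replaces A's character-by-character sliding-window state machine by splitting the
-- string on spaces once and scanning the token list with a skip-2 index loop
-- (measurably faster: the per-character work moves into the single split).

-- ===== PORT A =====
-- state: (san, currentTwo, currentMove, addToMove)
def get_san_step (st : List String × String × String × Bool) (letter : Char) :
    List String × String × String × Bool :=
  let san := st.1
  let currentTwo := st.2.1
  let currentMove := st.2.2.1
  let addToMove := st.2.2.2
  let currentTwo := currentTwo.push letter                       -- currentTwo += letter
  let currentTwo := PySem.Str.slice currentTwo (some 1) none     -- currentTwo = currentTwo[1:]
  if letter = ' ' ∧ addToMove = true then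
    (san ++ [currentMove], currentTwo, "", false)
  else if addToMove then
    (san, currentTwo, currentMove.push letter, addToMove)
  else
    if currentTwo = ". " then (san, currentTwo, currentMove, true)
    else (san, currentTwo, currentMove, addToMove)

def get_san (pgnString : String) : List String :=
  (pgnString.toList.foldl get_san_step ([], "__", "", false)).1

-- ===== PORT B =====
-- the while loop of Source B: runs over tokens[i:]; stops when one token (the last) is left
def get_san_alt_go : List String → List String
  | [] => []
  | [_] => []
  | t :: m :: rest =>
      if PySem.Str.endswith t "." then
        if rest = [] then get_san_alt_go rest       -- i + 1 = last: nothing appended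
        else m :: get_san_alt_go rest               -- append tokens[i+1], i += 2
      else get_san_alt_go (m :: rest)               -- i += 1

def get_san_alt (pgnString : String) : List String :=
  -- tokens = pgnString.split(" "); sep is non-empty so split? never returns none
  get_san_alt_go ((PySem.Str.split? pgnString " ").getD [])

-- ===== PRECONDITION & SPEC =====
def Spec_get_san (pgnString : String) (out : List String) : Prop := out = get_san_alt pgnString
instance (pgnString : String) (out : List String) : Decidable (Spec_get_san pgnString out) := by unfold Spec_get_san; infer_instance

-- ===== CLAIM (what is proved, stated in full; the proofs are below) =====
def Claim_equal_get_san : Prop := ∀ (pgnString : String), Dom_get_san pgnString → Spec_get_san pgnString (get_san pgnString)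

-- ===== LEMMAS AND PROOFS =====

-- split on a single literal space (Python s.split(" ") over char lists)
def split1 : List Char → List (List Char)
  | [] => [[]]
  | c :: cs =>
      if c = ' ' then [] :: split1 cs
      else
        match split1 cs with
        | [] => [[c]]
        | t :: ts => (c :: t) :: ts

-- clean reformulation of A's state machine: idle (prev = last char seen) / collecting
mutual
def runIdle (prev : Char) : List Char → List String
  | [] => []
  | c :: cs => if prev = '.' ∧ c = ' ' then runCollect "" cs else runIdle c cs
def runCollect (acc : String) : List Char → List String
  | [] => []
  | c :: cs => if c = ' ' then acc :: runIdle ' ' cs else runCollect (acc.push c) cs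
end

-- B's scan over char-list tokens
def goB : List (List Char) → List String
  | [] => []
  | [_] => []
  | t :: m :: rest =>
      if ['.'].isSuffixOf t then
        if rest = [] then goB rest else String.ofList m :: goB rest
      else goB (m :: rest)

theorem split1_ne_nil (cs : List Char) : split1 cs ≠ [] := by
  induction cs with
  | nil => simp [split1]
  | cons c cs ih =>
      simp only [split1]
      split
      · simp
      · cases h : split1 cs with
        | nil => simp
        | cons t ts => simp

theorem foldA (cs : List Char) :
    ∀ (a b : Char) (san : List String) (s : String), s.toList = [a, b] →
      ((cs.foldl get_san_step (san, s, "", false)).1 = san ++ runIdle b cs ∧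
       ∀ mv, (cs.foldl get_san_step (san, s, mv, true)).1 = san ++ runCollect mv cs) := by
  induction cs with
  | nil => intro a b san s hs; simp [runIdle, runCollect]
  | cons c cs ih =>
      intro a b san s hs
      have hpush : (s.push c).toList = [a, b, c] := by simp [hs]
      have hct : (PySem.Str.slice (s.push c) (some 1) none).toList = [b, c] := by
        rw [PySem.Str.toList_slice, PySem.Chars.slice_eq_listSlice, hpush,
          PySem.List.slice_from_one]
        rfl
      constructor
      · simp only [List.foldl_cons, get_san_step]
        rw [if_neg (by simp)]
        rw [if_neg (by simp)]
        by_cases h2 : PySem.Str.slice (s.push c) (some 1) none = ". "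
        · have hbc : b = '.' ∧ c = ' ' := by
            rw [h2] at hct
            have h3 : [b, c] = ['.', ' '] := by rw [← hct]; decide
            simp at h3; tauto
          rw [if_pos h2]
          rw [(ih b c san _ hct).2 ""]
          simp only [runIdle, if_pos hbc]
        · rw [if_neg h2]
          rw [(ih b c san _ hct).1]
          have hnbc : ¬ (b = '.' ∧ c = ' ') := by
            intro hbc
            apply h2
            apply String.ext
            rw [hct, hbc.1, hbc.2]
            decide
          simp only [runIdle, if_neg hnbc]
      · intro mv
        simp only [List.foldl_cons, get_san_step]
        by_cases hsp : c = ' '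
        · rw [if_pos (by simp [hsp])]
          rw [(ih b c (san ++ [mv]) _ hct).1]
          simp only [runCollect, hsp, if_true]
          simp
        · rw [if_neg (by simp [hsp])]
          rw [if_pos trivial]
          rw [(ih b c san _ hct).2 (mv.push c)]
          simp only [runCollect, if_neg hsp]

theorem runIdle_no_space (t : List Char) (h : ' ' ∉ t) (prev : Char) : runIdle prev t = [] := by
  induction t generalizing prev with
  | nil => rfl
  | cons c cs ih =>
      simp only [List.mem_cons, not_or] at h
      simp only [runIdle]
      rw [if_neg (by tauto)]
      exact ih (by tauto) c

theorem runCollect_no_space (t : List Char) (h : ' ' ∉ t) (acc : String) : runCollect acc t = [] := by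
  induction t generalizing acc with
  | nil => rfl
  | cons c cs ih =>
      simp only [List.mem_cons, not_or] at h
      simp only [runCollect]
      rw [if_neg (by tauto)]
      exact ih (by tauto) _

theorem runIdle_token (t : List Char) (h : ' ' ∉ t) (cs : List Char) (prev : Char) :
    runIdle prev (t ++ ' ' :: cs) =
      if t.getLast?.getD prev = '.' then runCollect "" cs else runIdle ' ' cs := by
  induction t generalizing prev with
  | nil => simp [runIdle]
  | cons d t' ih =>
      simp only [List.mem_cons, not_or] at h
      simp only [List.cons_append, runIdle]
      rw [if_neg (by tauto)]
      rw [ih (by tauto) d]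
      congr 1
      cases t' <;> simp [List.getLast?_cons]

theorem runCollect_token (m : List Char) (h : ' ' ∉ m) (cs : List Char) (acc : String) :
    runCollect acc (m ++ ' ' :: cs) = String.ofList (acc.toList ++ m) :: runIdle ' ' cs := by
  induction m generalizing acc with
  | nil => simp [runCollect, String.ofList_toList]
  | cons c m' ih =>
      simp only [List.mem_cons, not_or] at h
      simp only [List.cons_append, runCollect]
      rw [if_neg (by tauto)]
      rw [ih (by tauto)]
      simp

theorem split1_no_space (t : List Char) (h : ' ' ∉ t) : split1 t = [t] := by
  induction t with
  | nil => rfl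
  | cons c cs ih =>
      simp only [List.mem_cons, not_or] at h
      simp only [split1]
      rw [if_neg (by tauto), ih (by tauto)]

theorem split1_token (t : List Char) (h : ' ' ∉ t) (cs : List Char) :
    split1 (t ++ ' ' :: cs) = t :: split1 cs := by
  induction t with
  | nil => simp [split1]
  | cons c t' ih =>
      simp only [List.mem_cons, not_or] at h
      simp only [List.cons_append, split1]
      rw [if_neg (by tauto), ih (by tauto)]

theorem endsdot_iff (t : List Char) : ['.'].isSuffixOf t = true ↔ t.getLast? = some '.' := by
  rw [List.isSuffixOf_iff_suffix]
  constructor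
  · rintro ⟨u, rfl⟩; simp
  · intro h
    exact ⟨t.dropLast, by rw [List.dropLast_append_getLast? _ h]⟩

theorem space_decomp (cs : List Char) :
    (' ' ∉ cs) ∨ ∃ t cs₂, cs = t ++ ' ' :: cs₂ ∧ ' ' ∉ t := by
  induction cs with
  | nil => left; simp
  | cons c cs ih =>
      by_cases hc : c = ' '
      · right; exact ⟨[], cs, by rw [hc]; rfl, by simp⟩
      · rcases ih with h | ⟨t, cs₂, rfl, ht⟩
        · left
          intro hmem
          rcases List.mem_cons.mp hmem with h' | h'
          · exact hc h'.symm
          · exact h h'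
        · right
          refine ⟨c :: t, cs₂, rfl, ?_⟩
          intro hmem
          rcases List.mem_cons.mp hmem with h' | h'
          · exact hc h'.symm
          · exact ht h'

theorem main_idle : ∀ (n : ℕ) (cs : List Char), cs.length ≤ n → ∀ prev, prev ≠ '.' →
    runIdle prev cs = goB (split1 cs) := by
  intro n
  induction n with
  | zero =>
      intro cs hl prev hprev
      have : cs = [] := List.length_eq_zero_iff.mp (Nat.le_zero.mp hl)
      subst this; rfl
  | succ n ih =>
      intro cs hl prev hprev
      rcases space_decomp cs with h | ⟨t, cs₂, rfl, ht⟩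
      · rw [runIdle_no_space cs h prev, split1_no_space cs h]; rfl
      · have hlen : t.length + (cs₂.length + 1) = (t ++ ' ' :: cs₂).length := by simp
        rw [runIdle_token t ht cs₂ prev, split1_token t ht cs₂]
        by_cases hdot : t.getLast?.getD prev = '.'
        · rw [if_pos hdot]
          have htl : t.getLast? = some '.' := by
            cases hgl : t.getLast? with
            | none => rw [hgl] at hdot; exact absurd hdot hprev
            | some x => rw [hgl] at hdot; simp at hdot; rw [hdot]
          have hsuf : ['.'].isSuffixOf t = true := (endsdot_iff t).mpr htl
          rcases space_decomp cs₂ with h2 | ⟨m, cs₃, rfl, hm⟩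
          · rw [runCollect_no_space cs₂ h2 "", split1_no_space cs₂ h2]
            simp [goB, hsuf]
          · rw [runCollect_token m hm cs₃ "", split1_token m hm cs₃]
            simp only [goB, hsuf, if_true]
            rw [if_neg (split1_ne_nil cs₃)]
            rw [ih cs₃ (by simp at hl ⊢; omega) ' ' (by decide)]
            simp
        · rw [if_neg hdot]
          have hsuf : ¬ ['.'].isSuffixOf t = true := by
            intro hs
            have := (endsdot_iff t).mp hs
            rw [this] at hdot; simp at hdot
          obtain ⟨m, ts, hms⟩ := List.exists_cons_of_ne_nil (split1_ne_nil cs₂)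
          rw [hms]
          simp only [goB]
          rw [if_neg hsuf]
          rw [← hms, ih cs₂ (by simp at hl ⊢; omega) ' ' (by decide)]

theorem go_nil (fuel : ℕ) (cur : List Char) (acc : List (List Char)) :
    PySem.Chars.splitOn.go [' '] (fuel + 1) [] cur acc = (cur.reverse :: acc).reverse := by
  rw [PySem.Chars.splitOn.go.eq_def]

theorem go_cons_space (fuel : ℕ) (l cur : List Char) (acc : List (List Char)) :
    PySem.Chars.splitOn.go [' '] (fuel + 1) (' ' :: l) cur acc =
      PySem.Chars.splitOn.go [' '] fuel l [] (cur.reverse :: acc) := by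
  rw [PySem.Chars.splitOn.go.eq_def]
  simp [List.isPrefixOf]

theorem go_cons_ns (fuel : ℕ) (c : Char) (hc : c ≠ ' ') (l cur : List Char)
    (acc : List (List Char)) :
    PySem.Chars.splitOn.go [' '] (fuel + 1) (c :: l) cur acc =
      PySem.Chars.splitOn.go [' '] fuel l (c :: cur) acc := by
  rw [PySem.Chars.splitOn.go.eq_def]
  simp [List.isPrefixOf, Ne.symm hc]

theorem go_split1 : ∀ (fuel : ℕ) (l cur : List Char) (acc : List (List Char)),
    l.length < fuel →
    PySem.Chars.splitOn.go [' '] fuel l cur acc =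
      acc.reverse ++ ((cur.reverse ++ (split1 l).headI) :: (split1 l).tail) := by
  intro fuel
  induction fuel with
  | zero => intro l cur acc h; omega
  | succ fuel ih =>
      intro l cur acc h
      match l with
      | [] => rw [go_nil]; simp [split1]
      | c :: rest =>
          simp only [List.length_cons] at h
          by_cases hc : c = ' '
          · subst hc
            rw [go_cons_space, ih rest [] (cur.reverse :: acc) (by omega)]
            obtain ⟨m, ts, hms⟩ := List.exists_cons_of_ne_nil (split1_ne_nil rest)
            simp [split1, hms]
          · rw [go_cons_ns fuel c hc, ih rest (c :: cur) acc (by omega)]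
            obtain ⟨m, ts, hms⟩ := List.exists_cons_of_ne_nil (split1_ne_nil rest)
            simp [split1, hms, hc]

theorem tokens_eq (s : String) :
    (PySem.Str.split? s " ").getD [] = (split1 s.toList).map String.ofList := by
  have h1 : (PySem.Str.split? s " ").getD [] =
      (PySem.Chars.splitOn s.toList [' ']).map String.ofList := by
    simp [PySem.Str.split?, PySem.Chars.split?]
  rw [h1]
  unfold PySem.Chars.splitOn
  rw [go_split1 (s.toList.length + 1) s.toList [] [] (by omega)]
  obtain ⟨m, ts, hms⟩ := List.exists_cons_of_ne_nil (split1_ne_nil s.toList)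
  simp [hms]

theorem goB_map_aux : ∀ (n : ℕ) (l : List (List Char)), l.length ≤ n →
    get_san_alt_go (l.map String.ofList) = goB l := by
  intro n
  induction n with
  | zero =>
      intro l hl
      have : l = [] := List.length_eq_zero_iff.mp (Nat.le_zero.mp hl)
      subst this; rfl
  | succ n ih =>
      intro l hl
      match l with
      | [] => rfl
      | [_] => rfl
      | t :: m :: rest =>
          simp only [List.map, get_san_alt_go, goB]
          have he : PySem.Str.endswith (String.ofList t) "." = ['.'].isSuffixOf t := by
            simp [PySem.Str.endswith, PySem.Chars.endswith]
          rw [he]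
          simp only [List.length_cons] at hl
          split
          · by_cases hres : rest = []
            · subst hres; rfl
            · rw [if_neg (by simpa using hres), if_neg hres]
              rw [ih rest (by omega)]
          · exact ih (m :: rest) (by simpa using Nat.le_of_succ_le_succ hl)

theorem goB_map (l : List (List Char)) : get_san_alt_go (l.map String.ofList) = goB l :=
  goB_map_aux l.length l le_rfl

-- ===== VERDICT (by name: the statement is the Claim_ definition above) =====
theorem get_san_spec : Claim_equal_get_san := by
  intro p _
  unfold Spec_get_san get_san get_san_alt
  rw [tokens_eq, goB_map]
  have h := (foldA p.toList '_' '_' [] "__" (by decide)).1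
  rw [h, main_idle p.toList.length p.toList le_rfl '_' (by decide)]
  simp
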